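-- pv_equiv track=rewrite | github.com/songsongha/adventOfCode | 2025/Day 3/solutions.py | get_index_of_highest_value_2
-- ===== SOURCE A (Python) =====
-- def get_index_of_highest_value_2(string_num: str, exclude_size: int):
--     length = len(string_num)
--     exclude_index = length - exclude_size
--     for i in reversed(range(0,10)):
--         index = string_num.find(str(i))
--         if index == -1 or index >= exclude_index:
--             continue
--         return index
-- ===== SOURCE B (Python) =====
-- def get_index_of_highest_value_2(string_num: str, exclude_size: int):
--     exclude_index = len(string_num) - exclude_size
--     best_digit = None
--     best_index = None
--     for i, ch in enumerate(string_num[:max(exclude_index, 0)]):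
--         if '0' <= ch <= '9' and (best_digit is None or ch > best_digit):
--             best_digit = ch
--             best_index = i
--     return best_index
-- ===== Notes on version B (the rewrite author's own statement) =====
-- stated objective: simpler
-- what changed: Replaces A's ten whole-string .find passes (one per digit, descending) by a single left-to-right scan of the allowed prefix that tracks the running maximum digit and the index of its first occurrence.
import Mathlib
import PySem

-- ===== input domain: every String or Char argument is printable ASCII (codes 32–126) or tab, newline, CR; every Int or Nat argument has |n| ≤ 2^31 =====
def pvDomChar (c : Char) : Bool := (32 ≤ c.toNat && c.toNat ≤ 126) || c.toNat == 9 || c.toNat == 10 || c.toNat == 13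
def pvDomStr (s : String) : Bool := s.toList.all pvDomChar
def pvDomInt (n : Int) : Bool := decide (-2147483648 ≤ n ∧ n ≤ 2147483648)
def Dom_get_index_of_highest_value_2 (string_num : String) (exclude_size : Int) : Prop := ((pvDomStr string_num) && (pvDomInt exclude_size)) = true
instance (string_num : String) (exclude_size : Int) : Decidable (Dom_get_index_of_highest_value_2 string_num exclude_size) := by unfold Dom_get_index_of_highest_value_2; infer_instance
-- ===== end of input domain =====

-- B replaces A's ten .find passes over the whole string by one left-to-right scan of the
-- prefix tracking the running maximum digit and its first index (objective: simpler).

-- ===== PORT A =====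
-- for i in reversed(range(0,10)): index = string_num.find(str(i)); if index == -1 or index >= exclude_index: continue; return index
def pvLoopA (s : String) (exclude_index : Int) : List Int → Option Int
  | [] => none
  | i :: rest =>
      let index := PySem.Str.find s (PySem.Int.toStr i)
      if index = -1 ∨ exclude_index ≤ index then pvLoopA s exclude_index rest
      else some index

def get_index_of_highest_value_2 (string_num : String) (exclude_size : Int) : Option Int :=
  let length := PySem.Str.len string_num
  let exclude_index := length - exclude_size
  pvLoopA string_num exclude_index ((PySem.List.pyRange 0 10 1).reverse)

-- ===== PORT B =====
-- best_digit is None or ch > best_digit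
def pvBeats (ch : Char) (b : Option Char) : Bool :=
  match b with
  | none => true
  | some x => decide (x < ch)

-- for i, ch in enumerate(...): if '0' <= ch <= '9' and (best_digit is None or ch > best_digit): update
def pvLoopB : List (Int × Char) → Option Char → Option Int → Option Int
  | [], _, best_index => best_index
  | (i, ch) :: rest, best_digit, best_index =>
      if ('0' ≤ ch ∧ ch ≤ '9') ∧ pvBeats ch best_digit = true then
        pvLoopB rest (some ch) (some i)
      else
        pvLoopB rest best_digit best_index

def get_index_of_highest_value_2_alt (string_num : String) (exclude_size : Int) : Option Int :=
  let exclude_index := PySem.Str.len string_num - exclude_size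
  pvLoopB (PySem.List.enumerate (PySem.Str.slice string_num none (some (max exclude_index 0))).toList 0) none none

-- ===== PRECONDITION & SPEC =====
def Spec_get_index_of_highest_value_2 (string_num : String) (exclude_size : Int) (out : Option Int) : Prop := out = get_index_of_highest_value_2_alt string_num exclude_size
instance (string_num : String) (exclude_size : Int) (out : Option Int) : Decidable (Spec_get_index_of_highest_value_2 string_num exclude_size out) := by unfold Spec_get_index_of_highest_value_2; infer_instance

-- ===== CLAIM (what is proved, stated in full; the proofs are below) =====
def Claim_equal_get_index_of_highest_value_2 : Prop := ∀ (string_num : String) (exclude_size : Int), Dom_get_index_of_highest_value_2 string_num exclude_size → Spec_get_index_of_highest_value_2 string_num exclude_size (get_index_of_highest_value_2 string_num exclude_size)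

-- ===== LEMMAS AND PROOFS =====

-- digit characters in descending order, as A's loop visits them
def pvD10 : List Char := ['9', '8', '7', '6', '5', '4', '3', '2', '1', '0']

def pvChr (d : Int) : Char := Char.ofNat (48 + d.toNat)

-- index of the first occurrence of d
def pvFirstIdx (d : Char) : List Char → Option Nat
  | [] => none
  | c :: t => if c = d then some 0 else (pvFirstIdx d t).map (· + 1)

-- first index (in l) of the first candidate of ds that occurs in l
def pvDescend (l : List Char) : List Char → Option Nat
  | [] => none
  | d :: ds =>
      match pvFirstIdx d l with
      | some i => some i
      | none => pvDescend l ds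

def pvCands (b : Option Char) : List Char := pvD10.filter (fun d => pvBeats d b)

lemma pvFirstIdx_eq_none {d : Char} {l : List Char} (h : pvFirstIdx d l = none) : d ∉ l := by
  induction l with
  | nil => simp
  | cons c t ih =>
    simp only [pvFirstIdx] at h
    by_cases hc : c = d
    · simp [hc] at h
    · simp only [if_neg hc, Option.map_eq_none_iff] at h
      simp only [List.mem_cons, not_or]
      exact ⟨fun h' => hc h'.symm, ih h⟩

lemma pvFirstIdx_spec {d : Char} {l : List Char} {i : Nat} (h : pvFirstIdx d l = some i) :
    l[i]? = some d ∧ ∀ j < i, l[j]? ≠ some d := by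
  induction l generalizing i with
  | nil => simp [pvFirstIdx] at h
  | cons c t ih =>
    simp only [pvFirstIdx] at h
    by_cases hc : c = d
    · simp [hc] at h
      subst h
      simp [hc]
    · simp only [if_neg hc, Option.map_eq_some_iff] at h
      obtain ⟨i', hi', rfl⟩ := h
      obtain ⟨h1, h2⟩ := ih hi'
      refine ⟨by simpa using h1, ?_⟩
      intro j hj
      cases j with
      | zero => simpa using hc
      | succ j' => simpa using h2 j' (by omega)

lemma pvSingleton_prefix_drop (d : Char) (l : List Char) (k : Nat) :
    [d] <+: l.drop k ↔ l[k]? = some d := by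
  constructor
  · rintro ⟨t, ht⟩
    have : (l.drop k).head? = some d := by rw [← ht]; rfl
    simpa [List.head?_drop] using this
  · intro h
    cases hd : l.drop k with
    | nil => rw [← List.head?_drop, hd] at h; simp at h
    | cons a t =>
      have hat : a = d := by rw [← List.head?_drop, hd] at h; simpa using h
      subst hat
      exact ⟨t, rfl⟩

lemma pvFind_singleton (l : List Char) (d : Char) :
    PySem.Chars.find l [d] =
      match pvFirstIdx d l with
      | none => -1
      | some i => (i : Int) := by
  cases h : pvFirstIdx d l with
  | none =>
    have hmem := pvFirstIdx_eq_none h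
    rw [PySem.Chars.find_eq_neg_one_iff]
    intro hinf
    exact hmem (hinf.sublist.subset (by simp))
  | some i =>
    obtain ⟨hi, hleast⟩ := pvFirstIdx_spec h
    have hinf : [d] <:+: l :=
      ((pvSingleton_prefix_drop d l i).mpr hi).isInfix.trans (l.drop_suffix i).isInfix
    have hnn : 0 ≤ PySem.Chars.find l [d] := (PySem.Chars.find_nonneg_iff l [d]).mpr hinf
    obtain ⟨hpre, hlt⟩ := PySem.Chars.find_spec hnn
    have h1 : l[(PySem.Chars.find l [d]).toNat]? = some d :=
      (pvSingleton_prefix_drop d l _).mp hpre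
    have h2 : ¬ ((PySem.Chars.find l [d]).toNat < i) := fun hlt' => hleast _ hlt' h1
    have h3 : ¬ (i < (PySem.Chars.find l [d]).toNat) :=
      fun hl' => hlt i hl' ((pvSingleton_prefix_drop d l i).mpr hi)
    simp only []
    omega

lemma pvFirstIdx_take (d : Char) (l : List Char) (m i : Nat) :
    pvFirstIdx d (l.take m) = some i ↔ pvFirstIdx d l = some i ∧ i < m := by
  induction l generalizing m i with
  | nil => simp [pvFirstIdx]
  | cons c t ih =>
    cases m with
    | zero => simp [pvFirstIdx]
    | succ m' =>
      simp only [List.take_succ_cons, pvFirstIdx]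
      by_cases hc : c = d
      · simp only [if_pos hc, Option.some.injEq]
        omega
      · simp only [if_neg hc, Option.map_eq_some_iff]
        constructor
        · rintro ⟨i', hi', rfl⟩
          obtain ⟨h1, h2⟩ := (ih m' i').mp hi'
          exact ⟨⟨i', h1, rfl⟩, by omega⟩
        · rintro ⟨⟨i', h1, rfl⟩, h2⟩
          exact ⟨i', (ih m' i').mpr ⟨h1, by omega⟩, rfl⟩

lemma pvDescend_nil (ds : List Char) : pvDescend [] ds = none := by
  induction ds with
  | nil => rfl
  | cons d ds ih => simpa [pvDescend, pvFirstIdx] using ih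

lemma pvDescend_append (l ds1 ds2 : List Char) :
    pvDescend l (ds1 ++ ds2) = (pvDescend l ds1).or (pvDescend l ds2) := by
  induction ds1 with
  | nil => simp [pvDescend]
  | cons d ds ih =>
    simp only [List.cons_append, pvDescend]
    cases pvFirstIdx d l <;> simp [ih]

lemma pvDescend_skip {c : Char} (t : List Char) {ds : List Char} (h : ∀ d ∈ ds, d ≠ c) :
    pvDescend (c :: t) ds = (pvDescend t ds).map (· + 1) := by
  induction ds with
  | nil => rfl
  | cons d ds ih =>
    have hdc : ¬ (c = d) := fun h' => h d List.mem_cons_self h'.symm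
    simp only [pvDescend, pvFirstIdx, if_neg hdc]
    cases hft : pvFirstIdx d t with
    | some i => simp
    | none => simpa using ih (fun d' hd' => h d' (List.mem_cons_of_mem _ hd'))

lemma pvBeats_trans {c d : Char} {b : Option Char} (h1 : pvBeats c b = true) (h2 : c < d) :
    pvBeats d b = true := by
  cases b with
  | none => rfl
  | some x =>
    simp only [pvBeats, decide_eq_true_eq] at h1 ⊢
    exact lt_trans h1 h2

lemma pvFilter_split_desc (b : Option Char) (L : List Char) (hp : L.Pairwise (fun x y => y < x)) :
    ∀ c ∈ L, pvBeats c b = true →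
      ∃ lo, L.filter (fun d => pvBeats d b) = L.filter (fun d => decide (c < d)) ++ c :: lo := by
  induction L with
  | nil => simp
  | cons a L ih =>
    intro c hc hcb
    obtain ⟨hall, hp'⟩ := List.pairwise_cons.mp hp
    rcases List.mem_cons.mp hc with rfl | hcL
    · refine ⟨L.filter (fun d => pvBeats d b), ?_⟩
      have h1 : L.filter (fun d => decide (c < d)) = [] := by
        apply List.filter_eq_nil_iff.mpr
        intro d hd
        simpa using not_lt_of_gt (hall d hd)
      simp [hcb, h1]
    · have hac : c < a := hall c hcL
      have hab : pvBeats a b = true := pvBeats_trans hcb hac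
      obtain ⟨lo, heq⟩ := ih hp' c hcL hcb
      exact ⟨lo, by simp [hab, hac, heq]⟩

lemma pvMem_D10 (c : Char) (h1 : '0' ≤ c) (h2 : c ≤ '9') : c ∈ pvD10 := by
  have hb : 48 ≤ c.toNat ∧ c.toNat ≤ 57 := by
    simp [Char.le_def, UInt32.le_iff_toNat_le] at h1 h2
    exact ⟨h1, h2⟩
  have key : ∀ d : Char, c.toNat = d.toNat → c = d := fun d h => Char.ext (UInt32.toNat_inj.mp h)
  simp only [pvD10, List.mem_cons, List.not_mem_nil, or_false]
  have hd : c.toNat = 57 ∨ c.toNat = 56 ∨ c.toNat = 55 ∨ c.toNat = 54 ∨ c.toNat = 53 ∨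
      c.toNat = 52 ∨ c.toNat = 51 ∨ c.toNat = 50 ∨ c.toNat = 49 ∨ c.toNat = 48 := by omega
  rcases hd with h | h | h | h | h | h | h | h | h | h
  · exact Or.inl (key '9' h)
  · exact Or.inr (Or.inl (key '8' h))
  · exact Or.inr (Or.inr (Or.inl (key '7' h)))
  · exact Or.inr (Or.inr (Or.inr (Or.inl (key '6' h))))
  · exact Or.inr (Or.inr (Or.inr (Or.inr (Or.inl (key '5' h)))))
  · exact Or.inr (Or.inr (Or.inr (Or.inr (Or.inr (Or.inl (key '4' h))))))
  · exact Or.inr (Or.inr (Or.inr (Or.inr (Or.inr (Or.inr (Or.inl (key '3' h)))))))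
  · exact Or.inr (Or.inr (Or.inr (Or.inr (Or.inr (Or.inr (Or.inr (Or.inl (key '2' h))))))))
  · exact Or.inr (Or.inr (Or.inr (Or.inr (Or.inr (Or.inr (Or.inr (Or.inr (Or.inl (key '1' h)))))))))
  · exact Or.inr (Or.inr (Or.inr (Or.inr (Or.inr (Or.inr (Or.inr (Or.inr (Or.inr (key '0' h)))))))))

lemma pvDescend_cons_hit (c : Char) (t : List Char) (b : Option Char)
    (h1 : '0' ≤ c) (h2 : c ≤ '9') (hb : pvBeats c b = true) :
    pvDescend (c :: t) (pvCands b) =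
      match pvDescend t (pvCands (some c)) with
      | none => some 0
      | some i => some (i + 1) := by
  obtain ⟨lo, heq⟩ := pvFilter_split_desc b pvD10 (by decide) c (pvMem_D10 c h1 h2) hb
  have hhi : pvD10.filter (fun d => decide (c < d)) = pvCands (some c) := by
    unfold pvCands
    apply List.filter_congr
    intro d _
    simp [pvBeats]
  have hsplit : pvCands b = pvCands (some c) ++ c :: lo := by
    rw [pvCands, heq, hhi]
  rw [hsplit, pvDescend_append]
  have hski : pvDescend (c :: t) (pvCands (some c)) = (pvDescend t (pvCands (some c))).map (· + 1) := by
    apply pvDescend_skip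
    intro d hd
    have : pvBeats d (some c) = true := (List.mem_filter.mp hd).2
    simp only [pvBeats, decide_eq_true_eq] at this
    exact ne_of_gt this
  rw [hski]
  have hhead : pvDescend (c :: t) (c :: lo) = some 0 := by
    simp [pvDescend, pvFirstIdx]
  rw [hhead]
  cases pvDescend t (pvCands (some c)) <;> simp [Option.or]

lemma pvDescend_cons_miss (c : Char) (t : List Char) (b : Option Char)
    (hg : ¬ (('0' ≤ c ∧ c ≤ '9') ∧ pvBeats c b = true)) :
    pvDescend (c :: t) (pvCands b) = (pvDescend t (pvCands b)).map (· + 1) := by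
  apply pvDescend_skip
  intro d hd
  obtain ⟨hdm, hdb⟩ := List.mem_filter.mp hd
  have hdig : '0' ≤ d ∧ d ≤ '9' := by fin_cases hdm <;> exact ⟨by decide, by decide⟩
  intro hdc
  exact hg ⟨by rwa [← hdc], by rwa [← hdc]⟩

lemma pvLoopB_eq (l : List Char) : ∀ (j : Int) (b : Option Char) (bi : Option Int),
    pvLoopB (PySem.List.enumerate l j) b bi =
      match pvDescend l (pvCands b) with
      | none => bi
      | some i => some (j + (i : Int)) := by
  induction l with
  | nil => intro j b bi; simp [PySem.List.enumerate, pvLoopB, pvDescend_nil]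
  | cons c t ih =>
    intro j b bi
    rw [PySem.List.enumerate_cons]
    by_cases hg : ('0' ≤ c ∧ c ≤ '9') ∧ pvBeats c b = true
    · simp only [pvLoopB, if_pos hg]
      rw [ih (j + 1) (some c) (some j), pvDescend_cons_hit c t b hg.1.1 hg.1.2 hg.2]
      cases pvDescend t (pvCands (some c)) with
      | none => simp
      | some i => simp only []; congr 1; push_cast; ring
    · simp only [pvLoopB, if_neg hg]
      rw [ih (j + 1) b bi, pvDescend_cons_miss c t b hg]
      cases pvDescend t (pvCands b) with
      | none => simp
      | some i => simp only [Option.map_some]; congr 1; push_cast; ring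

lemma pvLoopA_eq (s : String) (k : Int) : ∀ (ds : List Int), (∀ d ∈ ds, 0 ≤ d ∧ d < 10) →
    pvLoopA s k ds =
      (pvDescend (s.toList.take (max k 0).toNat) (ds.map pvChr)).map (fun n => ((n : Nat) : Int)) := by
  intro ds
  induction ds with
  | nil => intro _; simp [pvLoopA, pvDescend]
  | cons d ds ih =>
    intro hds
    obtain ⟨h0, h10⟩ := hds d List.mem_cons_self
    have htos : (PySem.Int.toStr d).toList = [pvChr d] := by
      interval_cases d <;> decide
    simp only [pvLoopA, List.map_cons, pvDescend]
    cases hf : pvFirstIdx (pvChr d) s.toList with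
    | none =>
      have hfind : PySem.Str.find s (PySem.Int.toStr d) = -1 := by
        rw [PySem.Str.find_eq, htos, pvFind_singleton, hf]
      rw [hfind, if_pos (Or.inl rfl)]
      have hnone : pvFirstIdx (pvChr d) (s.toList.take (max k 0).toNat) = none := by
        cases h' : pvFirstIdx (pvChr d) (s.toList.take (max k 0).toNat) with
        | none => rfl
        | some i =>
          have := ((pvFirstIdx_take (pvChr d) s.toList _ i).mp h').1
          rw [hf] at this
          exact absurd this (by simp)
      rw [hnone]
      exact ih (fun d' hd' => hds d' (List.mem_cons_of_mem _ hd'))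
    | some i =>
      have hfind : PySem.Str.find s (PySem.Int.toStr d) = (i : Int) := by
        rw [PySem.Str.find_eq, htos, pvFind_singleton, hf]
      rw [hfind]
      by_cases hik : (i : Int) < k
      · rw [if_neg (by omega)]
        have hsome : pvFirstIdx (pvChr d) (s.toList.take (max k 0).toNat) = some i :=
          (pvFirstIdx_take (pvChr d) s.toList _ i).mpr ⟨hf, by omega⟩
        rw [hsome]
        rfl
      · rw [if_pos (by omega)]
        have hnone : pvFirstIdx (pvChr d) (s.toList.take (max k 0).toNat) = none := by
          cases h' : pvFirstIdx (pvChr d) (s.toList.take (max k 0).toNat) with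
          | none => rfl
          | some i' =>
            obtain ⟨h1, h2⟩ := (pvFirstIdx_take (pvChr d) s.toList _ i').mp h'
            rw [hf] at h1
            have : i' = i := by simpa using h1.symm
            omega
        rw [hnone]
        exact ih (fun d' hd' => hds d' (List.mem_cons_of_mem _ hd'))

-- ===== VERDICT (by name: the statement is the Claim_ definition above) =====
theorem get_index_of_highest_value_2_spec : Claim_equal_get_index_of_highest_value_2 := by
  intro string_num exclude_size _
  unfold Spec_get_index_of_highest_value_2
  unfold get_index_of_highest_value_2 get_index_of_highest_value_2_alt
  simp only []
  set k : Int := PySem.Str.len string_num - exclude_size with hk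
  have hA := pvLoopA_eq string_num k ((PySem.List.pyRange 0 10 1).reverse) (by decide)
  have hmap : ((PySem.List.pyRange 0 10 1).reverse).map pvChr = pvD10 := by decide
  rw [hmap] at hA
  have hpfx : (PySem.Str.slice string_num none (some (max k 0))).toList =
      string_num.toList.take (max k 0).toNat := by
    simp [PySem.Str.slice]
    rw [PySem.List.slice_to string_num.toList (le_max_right k 0)]
  have hB := pvLoopB_eq (string_num.toList.take (max k 0).toNat) 0 none none
  have hcands : pvCands none = pvD10 := by decide
  rw [hcands] at hB
  rw [hA, hpfx, hB]
  cases pvDescend (string_num.toList.take (max k 0).toNat) pvD10 with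
  | none => rfl
  | some i => simp
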